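-- pv_equiv track=rewrite | github.com/vieuxcolon/ehealth-horizontal-federated-learning | fluke_package/fluke/utils/log.py | _collect_metric_keys
-- ===== SOURCE A (Python) =====
-- def _collect_metric_keys(data_by_round: dict, include_client: bool) -> list[str]:
--     keys: list[str] = []
--     seen: set[str] = set()
--     for round_id in sorted(data_by_round.keys()):
--         metrics = data_by_round[round_id]
--         if include_client:
--             for evals in metrics.values():
--                 for key in evals.keys():
--                     if key not in seen:
--                         keys.append(key)
--                         seen.add(key)
--         else:
--             for key in metrics.keys():
--                     if key not in seen:
--                         keys.append(key)
--                         seen.add(key)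
--     return keys
-- ===== SOURCE B (Python) =====
-- def _collect_metric_keys(data_by_round: dict, include_client: bool) -> list[str]:
--     rounds = sorted(data_by_round.keys())
--     if include_client:
--         seq = [key
--                for round_id in rounds
--                for evals in data_by_round[round_id].values()
--                for key in evals.keys()]
--     else:
--         seq = [key
--                for round_id in rounds
--                for key in data_by_round[round_id].keys()]
--     # map each key to the index of its FIRST occurrence by assigning backwards
--     first: dict = {}
--     for i in range(len(seq) - 1, -1, -1):
--         first[seq[i]] = i
--     # the unique keys, ordered by first appearance = sorted by that index
--     return sorted(first, key=first.__getitem__)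
-- ===== Notes on version B (the rewrite author's own statement) =====
-- stated objective: alternative
-- what changed: Instead of A's single ordered pass with a seen-set, B flattens the key sequence, builds a first-occurrence-index map by a backwards overwrite loop, and recovers the order by SORTING the distinct keys by that index.
import Mathlib
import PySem

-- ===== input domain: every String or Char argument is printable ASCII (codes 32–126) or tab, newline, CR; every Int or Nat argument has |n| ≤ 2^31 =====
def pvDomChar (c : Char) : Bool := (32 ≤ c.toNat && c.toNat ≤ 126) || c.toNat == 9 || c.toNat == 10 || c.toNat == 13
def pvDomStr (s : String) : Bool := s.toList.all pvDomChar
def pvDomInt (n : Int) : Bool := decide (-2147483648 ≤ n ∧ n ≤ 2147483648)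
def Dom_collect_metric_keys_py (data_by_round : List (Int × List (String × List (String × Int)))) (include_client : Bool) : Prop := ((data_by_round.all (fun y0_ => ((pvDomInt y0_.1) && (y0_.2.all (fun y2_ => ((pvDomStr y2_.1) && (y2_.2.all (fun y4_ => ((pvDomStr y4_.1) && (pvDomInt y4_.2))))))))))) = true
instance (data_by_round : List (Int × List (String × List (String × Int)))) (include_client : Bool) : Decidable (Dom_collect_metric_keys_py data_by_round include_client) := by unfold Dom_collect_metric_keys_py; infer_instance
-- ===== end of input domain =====

-- B replaces A's streaming seen-set dedup by a different algorithm: build a first-occurrence-index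
-- map with a backwards overwrite loop, then SORT the distinct keys by that index (return value only).

-- ===== PORT A =====
-- the body of A's inner 'if key not in seen: keys.append(key); seen.add(key)'
def pvStepA (st : List String × PySem.Set String) (key : String) : List String × PySem.Set String :=
  if PySem.Set.contains st.2 key then st else (st.1 ++ [key], PySem.Set.add st.2 key)

def collect_metric_keys_py (data_by_round : List (Int × List (String × List (String × Int)))) (include_client : Bool) : List String :=
  let d : PySem.Dict Int (List (String × List (String × Int))) := PySem.Dict.mk data_by_round
  let st :=
    (PySem.List.sorted (PySem.Dict.keys d) (fun x => x) false).foldl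
      (fun st round_id =>
        let metrics : PySem.Dict String (List (String × Int)) :=
          PySem.Dict.mk (PySem.Dict.getD d round_id [])
        if include_client then
          (PySem.Dict.values metrics).foldl
            (fun st evals => (PySem.Dict.keys (PySem.Dict.mk evals)).foldl pvStepA st) st
        else
          (PySem.Dict.keys metrics).foldl pvStepA st)
      ([], PySem.Set.empty)
  st.1

-- ===== PORT B =====
def collect_metric_keys_py_alt (data_by_round : List (Int × List (String × List (String × Int)))) (include_client : Bool) : List String :=
  let d : PySem.Dict Int (List (String × List (String × Int))) := PySem.Dict.mk data_by_round
  let rounds := PySem.List.sorted (PySem.Dict.keys d) (fun x => x) false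
  let seq : List String :=
    if include_client then
      rounds.flatMap
        (fun round_id =>
          (PySem.Dict.values (PySem.Dict.mk (PySem.Dict.getD d round_id []))).flatMap
            (fun evals => PySem.Dict.keys (PySem.Dict.mk evals)))
    else
      rounds.flatMap
        (fun round_id => PySem.Dict.keys (PySem.Dict.mk (PySem.Dict.getD d round_id [])))
  -- 'for i in range(len(seq) - 1, -1, -1): first[seq[i]] = i'
  let first : PySem.Dict String Int :=
    (PySem.List.pyRange (PySem.List.len seq - 1) (-1) (-1)).foldl
      (fun fd i => fd.insert (PySem.List.pyGetD seq i "") i) PySem.Dict.empty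
  -- key=first.__getitem__: every key sorted is a key of first, so getD's default is never read
  PySem.List.sorted (PySem.Dict.keys first) (fun k => PySem.Dict.getD first k 0) false

-- ===== PRECONDITION & SPEC =====
def Spec_collect_metric_keys_py (data_by_round : List (Int × List (String × List (String × Int)))) (include_client : Bool) (out : List String) : Prop := out = collect_metric_keys_py_alt data_by_round include_client
instance (data_by_round : List (Int × List (String × List (String × Int)))) (include_client : Bool) (out : List String) : Decidable (Spec_collect_metric_keys_py data_by_round include_client out) := by unfold Spec_collect_metric_keys_py; infer_instance

-- ===== CLAIM (what is proved, stated in full; the proofs are below) =====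
def Claim_equal_collect_metric_keys_py : Prop := ∀ (data_by_round : List (Int × List (String × List (String × Int)))) (include_client : Bool), Dom_collect_metric_keys_py data_by_round include_client → Spec_collect_metric_keys_py data_by_round include_client (collect_metric_keys_py data_by_round include_client)

-- ===== LEMMAS AND PROOFS =====

-- ---- A-side: the seen-set pass computes PySem.List.dedup of the flattened key sequence ----

-- on a diagonal state, A's append-if-unseen step is exactly PySem.Set.add on both components
theorem pvStepA_diag (s : PySem.Set String) (k : String) :
    pvStepA (s, s) k = (PySem.Set.add s k, PySem.Set.add s k) := by
  simp only [pvStepA, PySem.Set.add_eq_ite]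
  by_cases h : k ∈ s
  · simp [h]
  · have hc : PySem.Set.contains s k = false := by
      cases hh : PySem.Set.contains s k
      · rfl
      · exact absurd ((PySem.Set.contains_iff s k).1 hh) h
    simp [h]

-- A's innermost loop on a diagonal state is Set.update on both components
theorem foldl_pvStepA (l : List String) (s : PySem.Set String) :
    l.foldl pvStepA (s, s) = (PySem.Set.update s l, PySem.Set.update s l) := by
  induction l generalizing s with
  | nil => simp [PySem.Set.update]
  | cons k t ih => simp [pvStepA_diag, PySem.Set.update_cons, ih]

-- a fold of innermost loops is Set.update of the flattened key sequence
theorem foldl_foldl_pvStepA (ls : List (List String)) (s : PySem.Set String) :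
    ls.foldl (fun st ks => ks.foldl pvStepA st) (s, s)
      = (PySem.Set.update s ls.flatten, PySem.Set.update s ls.flatten) := by
  induction ls generalizing s with
  | nil => simp [PySem.Set.update]
  | cons ks t ih =>
      simp only [List.foldl_cons, foldl_pvStepA, ih, List.flatten_cons,
        PySem.Set.update_append]

-- and one level deeper (for the include_client branch)
theorem foldl3_pvStepA (lls : List (List (List String))) (s : PySem.Set String) :
    lls.foldl (fun st ls => ls.foldl (fun st ks => ks.foldl pvStepA st) st) (s, s)
      = (PySem.Set.update s lls.flatten.flatten, PySem.Set.update s lls.flatten.flatten) := by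
  induction lls generalizing s with
  | nil => simp [PySem.Set.update]
  | cons ls t ih =>
      simp only [List.foldl_cons, foldl_foldl_pvStepA, ih, List.flatten_cons,
        List.flatten_append, PySem.Set.update_append]

-- ---- B-side: the backwards overwrite loop, as a foldr over enumerate ----
def pvFirst (xs : List String) (s : Int) : PySem.Dict String Int :=
  (PySem.List.enumerate xs s).foldr (fun p fd => fd.insert p.2 p.1) PySem.Dict.empty

theorem pvFirst_cons (x : String) (xs : List String) (s : Int) :
    pvFirst (x :: xs) s = (pvFirst xs (s + 1)).insert x s := by
  simp [pvFirst, PySem.List.enumerate_cons]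

-- the map sends each key of xs to s + (index of its first occurrence)
theorem pvFirst_get? (xs : List String) (s : Int) (k : String) :
    (pvFirst xs s).get? k = (PySem.List.index? xs k).map (fun j => s + (j : Int)) := by
  induction xs generalizing s with
  | nil => simp [pvFirst, PySem.List.enumerate_nil, PySem.List.index?_eq_idxOf?]
  | cons x t ih =>
      rw [pvFirst_cons]
      by_cases hk : k = x
      · subst hk
        rw [PySem.Dict.get?_insert_self, PySem.List.index?_cons_self]
        simp
      · rw [PySem.Dict.get?_insert_of_ne _ _ hk, ih,
          PySem.List.index?_cons_of_ne _ (fun h => hk h.symm)]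
        cases PySem.List.index? t k with
        | none => simp
        | some j => simp; omega

theorem pvFirst_mem_keys (xs : List String) (s : Int) (k : String) :
    k ∈ (pvFirst xs s).keys ↔ k ∈ xs := by
  rw [← not_iff_not, ← PySem.Dict.get?_eq_none_iff_not_mem_keys, pvFirst_get?,
    ← PySem.List.index?_eq_none_iff xs k]
  cases PySem.List.index? xs k <;> simp

theorem pvFirst_nodup_keys (xs : List String) (s : Int) : (pvFirst xs s).keys.Nodup := by
  induction xs generalizing s with
  | nil => exact PySem.Dict.nodup_keys_empty
  | cons x t ih => rw [pvFirst_cons]; exact PySem.Dict.nodup_keys_insert _ _ _ (ih (s + 1))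

-- dedup xs is strictly increasing in the first-occurrence index
theorem pvDedup_pairwise (xs : List String) :
    (PySem.List.dedup xs).Pairwise
      (fun a b => ((PySem.List.index? xs a).getD 0) < ((PySem.List.index? xs b).getD 0)) := by
  induction xs with
  | nil => simp
  | cons x t ih =>
      rw [PySem.List.dedup_eq_ofList, PySem.Set.ofList_cons]
      constructor
      · intro b hb
        have hmem := (PySem.Set.mem_discard _ _ _).1 hb
        have hbx : b ≠ x := hmem.2
        have hbt : b ∈ t := (PySem.Set.mem_ofList _ _).1 hmem.1
        obtain ⟨j, hj⟩ := Option.isSome_iff_exists.1 ((PySem.List.index?_isSome_iff t b).2 hbt)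
        rw [PySem.List.index?_cons_self, PySem.List.index?_cons_of_ne _ (fun h => hbx h.symm), hj]
        simp
      · have hsub : (PySem.Set.discard (PySem.Set.ofList t) x).Sublist (PySem.Set.ofList t) :=
          List.filter_sublist
        have ht : (PySem.Set.discard (PySem.Set.ofList t) x).Pairwise
            (fun a b => ((PySem.List.index? t a).getD 0) < ((PySem.List.index? t b).getD 0)) := by
          rw [← PySem.List.dedup_eq_ofList] at hsub
          exact ih.sublist hsub
        refine ht.imp_of_mem (fun {a b} ha hb h => ?_)
        have hax : a ≠ x := ((PySem.Set.mem_discard _ _ _).1 ha).2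
        have hbx : b ≠ x := ((PySem.Set.mem_discard _ _ _).1 hb).2
        have hat : a ∈ t := (PySem.Set.mem_ofList _ _).1 ((PySem.Set.mem_discard _ _ _).1 ha).1
        have hbt : b ∈ t := (PySem.Set.mem_ofList _ _).1 ((PySem.Set.mem_discard _ _ _).1 hb).1
        obtain ⟨ja, hja⟩ := Option.isSome_iff_exists.1 ((PySem.List.index?_isSome_iff t a).2 hat)
        obtain ⟨jb, hjb⟩ := Option.isSome_iff_exists.1 ((PySem.List.index?_isSome_iff t b).2 hbt)
        rw [PySem.List.index?_cons_of_ne _ (fun hh => hax hh.symm),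
          PySem.List.index?_cons_of_ne _ (fun hh => hbx hh.symm), hja, hjb]
        rw [hja, hjb] at h
        simp at h ⊢
        omega

-- B's final sort of the distinct keys by their first index is exactly ordered dedup
theorem pvAltSort (seq : List String) :
    PySem.List.sorted
      (PySem.Dict.keys ((PySem.List.pyRange (PySem.List.len seq - 1) (-1) (-1)).foldl
          (fun fd i => fd.insert (PySem.List.pyGetD seq i "") i) PySem.Dict.empty))
      (fun k => PySem.Dict.getD ((PySem.List.pyRange (PySem.List.len seq - 1) (-1) (-1)).foldl
          (fun fd i => fd.insert (PySem.List.pyGetD seq i "") i) PySem.Dict.empty) k 0) false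
    = PySem.List.dedup seq := by
  have hfold :
      (PySem.List.pyRange (PySem.List.len seq - 1) (-1) (-1)).foldl
          (fun fd i => fd.insert (PySem.List.pyGetD seq i "") i) PySem.Dict.empty
        = pvFirst seq 0 := by
    rw [PySem.List.pyRange_neg_one_eq_reverse]
    norm_num
    rw [pvFirst, PySem.List.enumerate_eq_map_pyRange seq "", List.foldr_map]
    simp
  rw [hfold]
  refine PySem.List.sorted_eq_of_perm_of_pairwise_lt _ _ _ ?_ ?_
  · refine (List.perm_ext_iff_of_nodup (PySem.List.nodup_dedup seq)
      (pvFirst_nodup_keys seq 0)).2 (fun k => ?_)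
    rw [PySem.List.mem_dedup, pvFirst_mem_keys]
  · refine (pvDedup_pairwise seq).imp_of_mem (fun {a b} ha hb h => ?_)
    have haseq : a ∈ seq := (PySem.List.mem_dedup _ _).1 ha
    have hbseq : b ∈ seq := (PySem.List.mem_dedup _ _).1 hb
    obtain ⟨ja, hja⟩ := Option.isSome_iff_exists.1 ((PySem.List.index?_isSome_iff seq a).2 haseq)
    obtain ⟨jb, hjb⟩ := Option.isSome_iff_exists.1 ((PySem.List.index?_isSome_iff seq b).2 hbseq)
    rw [PySem.Dict.getD_eq_get?_getD, PySem.Dict.getD_eq_get?_getD,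
      pvFirst_get?, pvFirst_get?, hja, hjb]
    rw [hja, hjb] at h
    simp at h ⊢
    omega

-- ===== VERDICT (by name: the statement is the Claim_ definition above) =====
theorem collect_metric_keys_py_spec : Claim_equal_collect_metric_keys_py := by
  intro d inc _
  unfold Spec_collect_metric_keys_py collect_metric_keys_py collect_metric_keys_py_alt
  cases inc
  · simp only [Bool.false_eq_true, if_false]
    rw [pvAltSort]
    rw [← List.foldl_map
          (f := fun round_id => PySem.Dict.keys (PySem.Dict.mk
            (PySem.Dict.getD (PySem.Dict.mk d) round_id [])))
          (g := fun st ks => ks.foldl pvStepA st)]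
    rw [show (([], PySem.Set.empty) : List String × PySem.Set String)
          = (PySem.Set.empty, PySem.Set.empty) from rfl, foldl_foldl_pvStepA]
    simp only [List.flatMap_def]
    simp only [pysem]
  · simp only [if_true]
    rw [pvAltSort]
    have h1 :
        (PySem.List.sorted (PySem.Dict.keys (PySem.Dict.mk d)) (fun x => x) false).foldl
          (fun st round_id =>
            (PySem.Dict.values (PySem.Dict.mk (PySem.Dict.getD (PySem.Dict.mk d) round_id []))).foldl
              (fun st evals => (PySem.Dict.keys (PySem.Dict.mk evals)).foldl pvStepA st) st)
          ([], PySem.Set.empty)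
        = ((PySem.List.sorted (PySem.Dict.keys (PySem.Dict.mk d)) (fun x => x) false).map
            (fun round_id =>
              (PySem.Dict.values (PySem.Dict.mk (PySem.Dict.getD (PySem.Dict.mk d) round_id []))).map
                (fun evals => PySem.Dict.keys (PySem.Dict.mk evals)))).foldl
            (fun st ls => ls.foldl (fun st ks => ks.foldl pvStepA st) st) ([], PySem.Set.empty) := by
      rw [List.foldl_map]
      refine Eq.symm (PySem.List.foldl_congr_mem _ _ _ _ fun acc rid _ => ?_)
      rw [List.foldl_map]
    rw [h1]
    rw [show (([], PySem.Set.empty) : List String × PySem.Set String)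
          = (PySem.Set.empty, PySem.Set.empty) from rfl, foldl3_pvStepA]
    simp only [List.flatMap_def, List.flatten_flatten, List.map_map, Function.comp_def]
    simp only [pysem]
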